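-- pv_equiv track=rewrite | github.com/Mareantz/Laboratoare-Python-24 | Lab03/ex09.py | short_spectators
-- ===== SOURCE A (Python) =====
-- def short_spectators(matrix: list[list]) -> list[tuple]:
--     result = []
--
--     for i in range(len(matrix[0])):
--         column_max = 0
--         for j in range(len(matrix)):
--             if matrix[j][i] > column_max:
--                 column_max = matrix[j][i]
--             else:
--                 result.append((j, i))
--     return result
-- ===== SOURCE B (Python) =====
-- def short_spectators(matrix: list[list]) -> list[tuple]:
--     result = []
--     n_rows = len(matrix)
--     for i in range(len(matrix[0])):
--         col = [matrix[j][i] for j in range(n_rows)]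
--         prefix = [0]
--         for v in col:
--             prefix.append(max(prefix[-1], v))
--         for j in range(n_rows):
--             if col[j] <= prefix[j]:
--                 result.append((j, i))
--     return result
-- ===== Notes on version B (the rewrite author's own statement) =====
-- stated objective: alternative
-- what changed: Replaces the fused loop that interleaves updating a running column maximum with appending results by a three-phase per-column pipeline: materialize the column, precompute a prefix-maximum table seeded with 0, then a separate comparison pass appending (j,i) where col[j] <= prefix[j].
import Mathlib
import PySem

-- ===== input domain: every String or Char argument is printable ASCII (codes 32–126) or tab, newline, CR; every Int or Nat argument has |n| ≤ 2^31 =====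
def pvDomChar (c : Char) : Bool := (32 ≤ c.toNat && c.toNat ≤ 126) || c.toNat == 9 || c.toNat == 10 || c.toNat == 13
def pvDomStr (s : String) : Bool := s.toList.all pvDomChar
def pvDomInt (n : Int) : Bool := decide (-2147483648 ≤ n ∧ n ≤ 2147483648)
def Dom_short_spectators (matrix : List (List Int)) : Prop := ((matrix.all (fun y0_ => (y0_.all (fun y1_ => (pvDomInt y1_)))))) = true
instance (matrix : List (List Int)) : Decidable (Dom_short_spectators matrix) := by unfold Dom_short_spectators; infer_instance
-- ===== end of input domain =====

-- B replaces A's fused loop (running column max interleaved with appends) by a per-column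
-- three-phase pipeline: materialize the column, build a 0-seeded prefix-maximum table, then a
-- separate comparison pass; same cost, different decomposition (objective: alternative).

-- ===== PORT A =====
def short_spectators (matrix : List (List Int)) : List (Int × Int) :=
  (PySem.List.pyRange 0 ((PySem.List.pyGetD matrix 0 ([] : List Int)).length : Int) 1).foldl
    (fun result i =>
      ((PySem.List.pyRange 0 (matrix.length : Int) 1).foldl
        (fun (st : List (Int × Int) × Int) j =>
          if PySem.List.pyGetD (PySem.List.pyGetD matrix j []) i 0 > st.2 then
            (st.1, PySem.List.pyGetD (PySem.List.pyGetD matrix j []) i 0)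
          else
            (st.1 ++ [(j, i)], st.2))
        (result, (0 : Int))).1)
    []

-- ===== PORT B =====
def short_spectators_alt (matrix : List (List Int)) : List (Int × Int) :=
  (PySem.List.pyRange 0 ((PySem.List.pyGetD matrix 0 ([] : List Int)).length : Int) 1).foldl
    (fun result i =>
      let col : List Int := (PySem.List.pyRange 0 (matrix.length : Int) 1).map
        (fun j => PySem.List.pyGetD (PySem.List.pyGetD matrix j []) i 0)
      let pfx : List Int := col.foldl
        (fun p v => p ++ [max (PySem.List.pyGetD p (-1) 0) v]) [(0 : Int)]
      (PySem.List.pyRange 0 (matrix.length : Int) 1).foldl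
        (fun res j =>
          if PySem.List.pyGetD col j 0 ≤ PySem.List.pyGetD pfx j 0 then res ++ [(j, i)]
          else res)
        result)
    []

-- ===== PRECONDITION & SPEC =====
-- Pre_ excludes exactly the inputs where the Python A raises IndexError: the empty matrix
-- (matrix[0]) and jagged matrices with a row shorter than row 0 (matrix[j][i]).
def Pre_short_spectators (matrix : List (List Int)) : Prop :=
  matrix ≠ [] ∧ ∀ row ∈ matrix, (matrix.headD []).length ≤ row.length
instance (matrix : List (List Int)) : Decidable (Pre_short_spectators matrix) := by
  unfold Pre_short_spectators; infer_instance
def pvWitness_short_spectators : List (List Int) := [[1, 2], [0, 3]]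

def Spec_short_spectators (matrix : List (List Int)) (out : List (Int × Int)) : Prop := out = short_spectators_alt matrix
instance (matrix : List (List Int)) (out : List (Int × Int)) : Decidable (Spec_short_spectators matrix out) := by unfold Spec_short_spectators; infer_instance

-- ===== CLAIM (what is proved, stated in full; the proofs are below) =====
def Claim_equal_short_spectators : Prop := ∀ (matrix : List (List Int)), Dom_short_spectators matrix → Pre_short_spectators matrix → Spec_short_spectators matrix (short_spectators matrix)

-- ===== LEMMAS AND PROOFS =====

-- prefix-maximum table seeded with m, as B's Python builds it (length = input length + 1)
def pmaxList (m : Int) : List Int → List Int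
  | [] => [m]
  | v :: vs => m :: pmaxList (max m v) vs

theorem pyGetD_neg_one_append (acc : List Int) (m : Int) :
    PySem.List.pyGetD (acc ++ [m]) (-1) 0 = m := by
  simp [PySem.List.pyGetD, PySem.List.pyGet?, PySem.List.pyIdx?]

theorem prefix_fold (vs : List Int) : ∀ (acc : List Int) (m : Int),
    vs.foldl (fun p v => p ++ [max (PySem.List.pyGetD p (-1) 0) v]) (acc ++ [m])
      = acc ++ pmaxList m vs := by
  induction vs with
  | nil => intro acc m; simp [pmaxList]
  | cons v vs ih =>
    intro acc m
    simp only [List.foldl_cons, pyGetD_neg_one_append]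
    rw [show acc ++ [m] ++ [max m v] = (acc ++ [m]) ++ [max m v] from rfl, ih (acc ++ [m]) (max m v)]
    simp [pmaxList]

theorem prefix_fold_zero (vs : List Int) :
    vs.foldl (fun p v => p ++ [max (PySem.List.pyGetD p (-1) 0) v]) [(0 : Int)]
      = pmaxList 0 vs := by
  have := prefix_fold vs [] 0
  simpa using this

theorem pmax_get (vs : List Int) : ∀ (m : Int) (k : Nat), k < vs.length →
    (pmaxList m vs).getD k 0 = (vs.take k).foldl max m := by
  induction vs with
  | nil => intro m k h; simp at h
  | cons v vs ih =>
    intro m k h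
    cases k with
    | zero => simp [pmaxList]
    | succ k =>
      simp only [pmaxList, List.getD_cons_succ, List.take_succ_cons, List.foldl_cons]
      exact ih (max m v) k (by simpa using h)

theorem col_get (f : Int → Int) (N : Nat) (j : Int) (h0 : 0 ≤ j) (h1 : j < (N : Int)) :
    PySem.List.pyGetD (((PySem.List.pyRange 0 (N : Int) 1).map f)) j 0 = f j := by
  have hlen : ((PySem.List.pyRange 0 (N : Int) 1).map f).length = N := by
    simp [PySem.List.length_pyRange_one]
  have hj : j < (((PySem.List.pyRange 0 (N : Int) 1).map f).length : Int) := by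
    rw [hlen]; exact h1
  rw [PySem.List.pyGetD_eq_getElem _ _ h0 hj]
  have hjN : j.toNat < (PySem.List.pyRange 0 (N : Int) 1).length := by
    simp [PySem.List.length_pyRange_one]; omega
  rw [List.getElem_map]
  rw [PySem.List.getElem_pyRange_one]
  congr 1
  omega

-- running max of the first k column values, with 0 as the seed
theorem take_succ_col (f : Int → Int) (N : Nat) (a : Int) (h0 : 0 ≤ a) (h1 : a < (N : Int)) :
    ((PySem.List.pyRange 0 (N : Int) 1).map f).take (a.toNat + 1)
      = ((PySem.List.pyRange 0 (N : Int) 1).map f).take a.toNat ++ [f a] := by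
  have hjN : a.toNat < ((PySem.List.pyRange 0 (N : Int) 1).map f).length := by
    simp [PySem.List.length_pyRange_one]; omega
  have ha : (0 : Int) + (a.toNat : Int) = a := by omega
  rw [List.take_add_one, List.getElem?_eq_getElem hjN]
  simp only [List.getElem_map, PySem.List.getElem_pyRange_one, ha]
  rfl

theorem inner_eq (f : Int → Int) (N : Nat) (i : Int) :
    ∀ (k : Nat) (a : Int) (res : List (Int × Int)) (m : Int),
    a + k = (N : Int) → 0 ≤ a →
    m = ((((PySem.List.pyRange 0 (N : Int) 1).map f).take a.toNat).foldl max 0) →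
    ((PySem.List.pyRange a (N : Int) 1).foldl
      (fun (st : List (Int × Int) × Int) j =>
        if f j > st.2 then (st.1, f j) else (st.1 ++ [(j, i)], st.2)) (res, m)).1
    = (PySem.List.pyRange a (N : Int) 1).foldl
      (fun r j =>
        if PySem.List.pyGetD ((PySem.List.pyRange 0 (N : Int) 1).map f) j 0 ≤
           PySem.List.pyGetD (pmaxList 0 ((PySem.List.pyRange 0 (N : Int) 1).map f)) j 0
        then r ++ [(j, i)] else r) res := by
  intro k
  induction k with
  | zero =>
    intro a res m hk h0 hm
    rw [PySem.List.pyRange_one_eq_nil (by omega)]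
    simp
  | succ k ih =>
    intro a res m hk h0 hm
    have haN : a < (N : Int) := by omega
    rw [PySem.List.pyRange_one_cons haN]
    simp only [List.foldl_cons]
    -- the prefix-table lookup at a equals the running maximum m
    have hlen : ((PySem.List.pyRange 0 (N : Int) 1).map f).length = N := by
      simp [PySem.List.length_pyRange_one]
    have hpfx : PySem.List.pyGetD (pmaxList 0 ((PySem.List.pyRange 0 (N : Int) 1).map f)) a 0 = m := by
      rw [PySem.List.pyGetD_of_nonneg _ _ h0]
      rw [pmax_get _ 0 a.toNat (by rw [hlen]; omega)]
      exact hm.symm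
    have hcol : PySem.List.pyGetD ((PySem.List.pyRange 0 (N : Int) 1).map f) a 0 = f a :=
      col_get f N a h0 haN
    rw [hpfx, hcol]
    have hnext : ∀ m', m' = max m (f a) →
        m' = ((((PySem.List.pyRange 0 (N : Int) 1).map f).take (a + 1).toNat).foldl max 0) := by
      intro m' hm'
      have : (a + 1).toNat = a.toNat + 1 := by omega
      rw [this, take_succ_col f N a h0 haN, List.foldl_append]
      simp [hm', hm]
    by_cases hc : f a > m
    · rw [if_pos hc, if_neg (by omega)]
      exact ih (a + 1) res (f a) (by omega) (by omega)
        (hnext (f a) (by omega))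
    · rw [if_neg hc, if_pos (by omega)]
      exact ih (a + 1) (res ++ [(a, i)]) m (by omega) (by omega)
        (hnext m (by omega))

-- ===== VERDICT (by name: the statement is the Claim_ definition above) =====
theorem short_spectators_spec : Claim_equal_short_spectators := by
  intro matrix _dom _pre
  unfold Spec_short_spectators short_spectators short_spectators_alt
  have hstep :
      (fun (result : List (Int × Int)) (i : Int) =>
        ((PySem.List.pyRange 0 (matrix.length : Int) 1).foldl
          (fun (st : List (Int × Int) × Int) j =>
            if PySem.List.pyGetD (PySem.List.pyGetD matrix j []) i 0 > st.2 then
              (st.1, PySem.List.pyGetD (PySem.List.pyGetD matrix j []) i 0)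
            else
              (st.1 ++ [(j, i)], st.2))
          (result, (0 : Int))).1)
      = (fun (result : List (Int × Int)) (i : Int) =>
        let col : List Int := (PySem.List.pyRange 0 (matrix.length : Int) 1).map
          (fun j => PySem.List.pyGetD (PySem.List.pyGetD matrix j []) i 0)
        let pfx : List Int := col.foldl
          (fun p v => p ++ [max (PySem.List.pyGetD p (-1) 0) v]) [(0 : Int)]
        (PySem.List.pyRange 0 (matrix.length : Int) 1).foldl
          (fun res j =>
            if PySem.List.pyGetD col j 0 ≤ PySem.List.pyGetD pfx j 0 then res ++ [(j, i)]
            else res)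
          result) := by
    funext result i
    show _ = (PySem.List.pyRange 0 (matrix.length : Int) 1).foldl _ result
    rw [prefix_fold_zero]
    exact inner_eq (fun j => PySem.List.pyGetD (PySem.List.pyGetD matrix j []) i 0)
      matrix.length i matrix.length 0 result 0 (by omega) (by omega) (by simp)
  rw [hstep]
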